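-- pv_equiv track=rewrite | github.com/yottajunaid/spiderhash | src/rainbow_tables.py | _detect_charset_type
-- ===== SOURCE A (Python) =====
-- def _detect_charset_type(password):
--     has_lower = any(c.islower() for c in password)
--     has_upper = any(c.isupper() for c in password)
--     has_digit = any(c.isdigit() for c in password)
--     has_special = any(not c.isalnum() for c in password)
--
--     if has_lower and has_upper and has_digit and has_special:
--         return "mixed_all"
--     elif has_lower and has_upper and has_digit:
--         return "mixed_alphanumeric"
--     elif has_lower and has_digit:
--         return "lower_digit"
--     elif has_upper and has_digit:
--         return "upper_digit"
--     elif has_lower and has_upper: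
--         return "mixed_alpha"
--     elif has_digit:
--         return "numeric"
--     elif has_lower:
--         return "lowercase"
--     elif has_upper:
--         return "uppercase"
--     else:
--         return "special"
-- ===== SOURCE B (Python) =====
-- _TABLE = [
--     "special", "lowercase", "uppercase", "mixed_alpha",
--     "numeric", "lower_digit", "upper_digit", "mixed_alphanumeric",
--     "special", "lowercase", "uppercase", "mixed_alpha",
--     "numeric", "lower_digit", "upper_digit", "mixed_all",
-- ]
--
-- def _detect_charset_type(password):
--     has_lower = has_upper = has_digit = has_special = False
--     for c in password:
--         has_lower = has_lower or c.islower()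
--         has_upper = has_upper or c.isupper()
--         has_digit = has_digit or c.isdigit()
--         has_special = has_special or not c.isalnum()
--     return _TABLE[has_lower + 2 * has_upper + 4 * has_digit + 8 * has_special]
-- ===== Notes on version B (the rewrite author's own statement) =====
-- stated objective: alternative
-- what changed: Four separate any(...) scans plus a 9-branch if-elif cascade are replaced by one pass that accumulates four boolean flags and a single lookup of the label in a 16-entry table indexed by the flag bitmask.
import Mathlib
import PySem

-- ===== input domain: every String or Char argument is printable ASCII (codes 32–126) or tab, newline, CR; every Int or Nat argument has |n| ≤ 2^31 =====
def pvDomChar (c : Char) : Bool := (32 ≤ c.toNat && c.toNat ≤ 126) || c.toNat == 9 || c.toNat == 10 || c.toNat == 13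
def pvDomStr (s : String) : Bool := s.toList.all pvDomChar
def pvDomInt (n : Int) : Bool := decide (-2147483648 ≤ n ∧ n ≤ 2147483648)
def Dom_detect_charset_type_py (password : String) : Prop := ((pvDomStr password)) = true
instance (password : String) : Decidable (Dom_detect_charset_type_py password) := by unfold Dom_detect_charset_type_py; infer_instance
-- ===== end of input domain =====

-- B replaces A's four any(...) scans and if-elif cascade with one flag-accumulating pass and a 16-entry table lookup (alternative decomposition, same cost).

-- ===== PORT A =====
-- four any(...) scans (PySem.Chars.* char predicates are exact on the ASCII domain), then the if-elif cascade
def detect_charset_type_py (password : String) : String :=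
  let has_lower := password.toList.any (fun c => PySem.Chars.islower c)
  let has_upper := password.toList.any (fun c => PySem.Chars.isupper c)
  let has_digit := password.toList.any (fun c => PySem.Chars.isdigit c)
  let has_special := password.toList.any (fun c => !PySem.Chars.isalnum c)
  if has_lower && has_upper && has_digit && has_special then "mixed_all"
  else if has_lower && has_upper && has_digit then "mixed_alphanumeric"
  else if has_lower && has_digit then "lower_digit"
  else if has_upper && has_digit then "upper_digit"
  else if has_lower && has_upper then "mixed_alpha"
  else if has_digit then "numeric"
  else if has_lower then "lowercase"
  else if has_upper then "uppercase"
  else "special"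

-- ===== PORT B =====
def pvTable : List String :=
  [ "special", "lowercase", "uppercase", "mixed_alpha",
    "numeric", "lower_digit", "upper_digit", "mixed_alphanumeric",
    "special", "lowercase", "uppercase", "mixed_alpha",
    "numeric", "lower_digit", "upper_digit", "mixed_all" ]

def pvStep (st : Bool × Bool × Bool × Bool) (c : Char) : Bool × Bool × Bool × Bool :=
  (st.1 || PySem.Chars.islower c,
   st.2.1 || PySem.Chars.isupper c,
   st.2.2.1 || PySem.Chars.isdigit c,
   st.2.2.2 || !PySem.Chars.isalnum c)

-- one pass over the characters, then _TABLE[idx]; the index is always 0..15 so pyGet? is always some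
def detect_charset_type_py_alt (password : String) : String :=
  let st := password.toList.foldl pvStep (false, false, false, false)
  let idx : Int := (if st.1 then 1 else 0) + 2 * (if st.2.1 then 1 else 0)
                 + 4 * (if st.2.2.1 then 1 else 0) + 8 * (if st.2.2.2 then 1 else 0)
  (PySem.List.pyGet? pvTable idx).getD ""

-- ===== PRECONDITION & SPEC =====
def Spec_detect_charset_type_py (password : String) (out : String) : Prop := out = detect_charset_type_py_alt password
instance (password : String) (out : String) : Decidable (Spec_detect_charset_type_py password out) := by unfold Spec_detect_charset_type_py; infer_instance

-- ===== CLAIM (what is proved, stated in full; the proofs are below) =====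
def Claim_equal_detect_charset_type_py : Prop := ∀ (password : String), Dom_detect_charset_type_py password → Spec_detect_charset_type_py password (detect_charset_type_py password)

-- ===== LEMMAS AND PROOFS =====

theorem pvFold_flags (xs : List Char) (l u d s : Bool) :
    xs.foldl pvStep (l, u, d, s) =
      (l || xs.any (fun c => PySem.Chars.islower c),
       u || xs.any (fun c => PySem.Chars.isupper c),
       d || xs.any (fun c => PySem.Chars.isdigit c),
       s || xs.any (fun c => !PySem.Chars.isalnum c)) := by
  induction xs generalizing l u d s with
  | nil => simp
  | cons x xs ih => simp [pvStep, ih, Bool.or_assoc]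

-- ===== VERDICT (by name: the statement is the Claim_ definition above) =====
theorem detect_charset_type_py_spec : Claim_equal_detect_charset_type_py := by
  intro password _
  unfold Spec_detect_charset_type_py detect_charset_type_py detect_charset_type_py_alt
  rw [pvFold_flags]
  cases password.toList.any (fun c => PySem.Chars.islower c) <;>
  cases password.toList.any (fun c => PySem.Chars.isupper c) <;>
  cases password.toList.any (fun c => PySem.Chars.isdigit c) <;>
  cases password.toList.any (fun c => !PySem.Chars.isalnum c) <;>
    rfl
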